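-- pv_equiv track=rewrite | github.com/sabia-group/gensec | gensec/modules.py | exclude_rotatable_from_cycles
-- ===== SOURCE A (Python) =====
-- def exclude_rotatable_from_cycles(list_of_torsions, cycles):
--     """
--     Excludes rotatable bonds that are part of a cycle from a list of torsions.
--
--     This function iterates over the list of torsions and checks if any of the bonds in a torsion are part of a cycle.
--     If a bond is part of a cycle, the torsion is removed from the list.
--
--     Args:
--         list_of_torsions (list): A list of tuples, where each tuple represents a torsion and contains the indices of the atoms in the torsion.
--         cycles (list): A list of lists, where each inner list represents a cycle and contains the indices of the atoms in the cycle.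
--
--     Returns:
--         list: A list of tuples, where each tuple represents a torsion and contains the indices of the atoms in the torsion.
--               Torsions that contain bonds that are part of a cycle are excluded.
--     """
--     rotatable = []
--     for torsion in list_of_torsions:
--         found = False
--         for cycle in cycles:
--             if torsion[1] in cycle and torsion[2] in cycle:
--                 found = True
--                 if found:
--                     break
--         if not found:
--             rotatable.append(torsion)
--     return rotatable
-- ===== SOURCE B (Python) =====
-- def exclude_rotatable_from_cycles(list_of_torsions, cycles):
--     atom_cycles = {}
--     for i, cycle in enumerate(cycles):
--         for atom in cycle:
--             atom_cycles.setdefault(atom, set()).add(i)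
--     empty = set()
--     return [t for t in list_of_torsions
--             if not (atom_cycles.get(t[1], empty) & atom_cycles.get(t[2], empty))]
-- ===== Notes on version B (the rewrite author's own statement) =====
-- stated objective: faster
-- what changed: Replaces A's per-torsion linear scan over every cycle with a precomputed atom-to-cycle-index map built in one pass, so each torsion needs only two hash lookups and a small set intersection.
import Mathlib
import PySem

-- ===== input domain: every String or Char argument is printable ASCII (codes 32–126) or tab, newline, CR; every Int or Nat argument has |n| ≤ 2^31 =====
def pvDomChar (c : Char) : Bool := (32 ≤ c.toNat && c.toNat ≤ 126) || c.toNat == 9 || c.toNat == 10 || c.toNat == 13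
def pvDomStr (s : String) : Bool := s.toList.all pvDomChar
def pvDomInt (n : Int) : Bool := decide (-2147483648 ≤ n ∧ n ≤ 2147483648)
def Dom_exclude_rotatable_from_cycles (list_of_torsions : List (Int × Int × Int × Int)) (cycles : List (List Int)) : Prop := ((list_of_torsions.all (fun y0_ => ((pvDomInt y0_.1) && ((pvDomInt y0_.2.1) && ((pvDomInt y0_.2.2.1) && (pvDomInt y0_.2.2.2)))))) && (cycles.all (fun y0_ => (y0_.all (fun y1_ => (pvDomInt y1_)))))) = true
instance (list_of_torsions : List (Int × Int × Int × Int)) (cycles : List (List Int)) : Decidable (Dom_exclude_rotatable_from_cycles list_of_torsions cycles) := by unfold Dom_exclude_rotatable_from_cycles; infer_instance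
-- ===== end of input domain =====

-- B replaces A's per-torsion scan over all cycles by a precomputed atom -> cycle-index map
-- followed by one set-intersection test per torsion (objective: faster filter pass).

-- ===== PORT A =====
-- the inner 'for cycle in cycles: … break' loop of A
def pvFoundA (t1 t2 : Int) : List (List Int) → Bool
  | [] => false
  | c :: rest => if c.contains t1 && c.contains t2 then true else pvFoundA t1 t2 rest

def exclude_rotatable_from_cycles (list_of_torsions : List (Int × Int × Int × Int)) (cycles : List (List Int)) : List (Int × Int × Int × Int) :=
  list_of_torsions.foldl
    (fun rotatable torsion =>
      if !(pvFoundA torsion.2.1 torsion.2.2.1 cycles) then rotatable ++ [torsion] else rotatable)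
    []

-- ===== PORT B =====
-- the build loop of Source B: atom_cycles.setdefault(atom, set()).add(i) = Dict.modify atom ∅ (add · i)
def pvAtomCycles (cycles : List (List Int)) : PySem.Dict Int (PySem.Set Int) :=
  (PySem.List.enumerate cycles).foldl
    (fun d p => p.2.foldl (fun d atom => d.modify atom PySem.Set.empty (fun s => PySem.Set.add s p.1)) d)
    PySem.Dict.empty

def exclude_rotatable_from_cycles_alt (list_of_torsions : List (Int × Int × Int × Int)) (cycles : List (List Int)) : List (Int × Int × Int × Int) :=
  let d := pvAtomCycles cycles
  list_of_torsions.filter (fun t =>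
    (PySem.Set.inter (d.getD t.2.1 PySem.Set.empty) (d.getD t.2.2.1 PySem.Set.empty)).isEmpty)

-- ===== PRECONDITION & SPEC =====
def Spec_exclude_rotatable_from_cycles (list_of_torsions : List (Int × Int × Int × Int)) (cycles : List (List Int)) (out : List (Int × Int × Int × Int)) : Prop := out = exclude_rotatable_from_cycles_alt list_of_torsions cycles
instance (list_of_torsions : List (Int × Int × Int × Int)) (cycles : List (List Int)) (out : List (Int × Int × Int × Int)) : Decidable (Spec_exclude_rotatable_from_cycles list_of_torsions cycles out) := by unfold Spec_exclude_rotatable_from_cycles; infer_instance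

-- ===== CLAIM (what is proved, stated in full; the proofs are below) =====
def Claim_equal_exclude_rotatable_from_cycles : Prop := ∀ (list_of_torsions : List (Int × Int × Int × Int)) (cycles : List (List Int)), Dom_exclude_rotatable_from_cycles list_of_torsions cycles → Spec_exclude_rotatable_from_cycles list_of_torsions cycles (exclude_rotatable_from_cycles list_of_torsions cycles)

-- ===== LEMMAS AND PROOFS =====

lemma mem_getD_inner (c : List Int) (i : Int) (d : PySem.Dict Int (PySem.Set Int))
    (atom j : Int) :
    j ∈ (c.foldl (fun d a => d.modify a PySem.Set.empty (fun s => PySem.Set.add s i)) d).getD atom PySem.Set.empty ↔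
      j ∈ d.getD atom PySem.Set.empty ∨ (j = i ∧ atom ∈ c) := by
  induction c generalizing d with
  | nil => simp
  | cons a rest ih =>
    simp only [List.foldl_cons, ih, PySem.Dict.getD_modify, List.mem_cons]
    by_cases h : atom = a
    · subst h
      simp [PySem.Set.mem_add]
      tauto
    · simp [h]

lemma mem_getD_build (l : List (Int × List Int)) (d : PySem.Dict Int (PySem.Set Int))
    (atom j : Int) :
    j ∈ (l.foldl (fun d p => p.2.foldl (fun d a => d.modify a PySem.Set.empty (fun s => PySem.Set.add s p.1)) d) d).getD atom PySem.Set.empty ↔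
      j ∈ d.getD atom PySem.Set.empty ∨ ∃ p ∈ l, j = p.1 ∧ atom ∈ p.2 := by
  induction l generalizing d with
  | nil => simp
  | cons p rest ih =>
    simp only [List.foldl_cons, ih, mem_getD_inner, List.mem_cons]
    constructor
    · rintro ((h | h) | ⟨q, hq, hj⟩)
      · exact Or.inl h
      · exact Or.inr ⟨p, Or.inl rfl, h⟩
      · exact Or.inr ⟨q, Or.inr hq, hj⟩
    · rintro (h | ⟨q, hq | hq, hj⟩)
      · exact Or.inl (Or.inl h)
      · exact Or.inl (Or.inr (hq ▸ hj))
      · exact Or.inr ⟨q, hq, hj⟩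

lemma mem_atomCycles (cycles : List (List Int)) (atom j : Int) :
    j ∈ (pvAtomCycles cycles).getD atom PySem.Set.empty ↔
      ∃ (k : Nat), ∃ (h : k < cycles.length), j = (k : Int) ∧ atom ∈ cycles[k] := by
  unfold pvAtomCycles
  rw [mem_getD_build]
  simp only [PySem.Dict.getD_empty]
  constructor
  · rintro (h | ⟨p, hp, hj, ha⟩)
    · simp [PySem.Set.empty] at h
    · obtain ⟨k, hk, rfl⟩ := (PySem.List.mem_enumerate_iff _ _ _).mp hp
      exact ⟨k, hk, by simpa using hj, ha⟩
  · rintro ⟨k, hk, rfl, ha⟩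
    exact Or.inr ⟨((k : Int), cycles[k]), (PySem.List.mem_enumerate_iff _ _ _).mpr ⟨k, hk, by simp⟩, rfl, ha⟩

lemma pvFoundA_iff (t1 t2 : Int) (cycles : List (List Int)) :
    pvFoundA t1 t2 cycles = true ↔ ∃ c ∈ cycles, t1 ∈ c ∧ t2 ∈ c := by
  induction cycles with
  | nil => simp [pvFoundA]
  | cons c rest ih =>
    simp only [pvFoundA]
    split_ifs with h
    · simp only [List.contains_eq_mem, Bool.and_eq_true, decide_eq_true_eq] at h
      simp only [true_iff]
      exact ⟨c, List.mem_cons_self, h⟩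
    · simp only [List.contains_eq_mem, Bool.and_eq_true, decide_eq_true_eq] at h
      rw [ih]
      constructor
      · rintro ⟨c', hc', hm⟩; exact ⟨c', List.mem_cons_of_mem _ hc', hm⟩
      · rintro ⟨c', hc', hm⟩
        rcases List.mem_cons.mp hc' with rfl | hc'
        · exact absurd hm h
        · exact ⟨c', hc', hm⟩

lemma found_eq_inter (t1 t2 : Int) (cycles : List (List Int)) :
    (!(pvFoundA t1 t2 cycles)) =
      (PySem.Set.inter ((pvAtomCycles cycles).getD t1 PySem.Set.empty)
        ((pvAtomCycles cycles).getD t2 PySem.Set.empty)).isEmpty := by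
  rw [Bool.eq_iff_iff, Bool.not_eq_eq_eq_not, Bool.not_true, ← Bool.not_eq_true, pvFoundA_iff,
    List.isEmpty_iff, List.eq_nil_iff_forall_not_mem]
  constructor
  · intro hno j hj
    rw [PySem.Set.mem_inter, mem_atomCycles, mem_atomCycles] at hj
    obtain ⟨⟨k, hk, hjk, h1⟩, ⟨k', hk', hjk', h2⟩⟩ := hj
    have hkk : k = k' := by omega
    subst hkk
    exact hno ⟨cycles[k], List.getElem_mem hk, h1, h2⟩
  · rintro hno ⟨c, hc, h1, h2⟩
    obtain ⟨k, hk, rfl⟩ := List.mem_iff_getElem.mp hc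
    have hmem : (k : Int) ∈ PySem.Set.inter ((pvAtomCycles cycles).getD t1 PySem.Set.empty)
        ((pvAtomCycles cycles).getD t2 PySem.Set.empty) := by
      rw [PySem.Set.mem_inter, mem_atomCycles, mem_atomCycles]
      exact ⟨⟨k, hk, rfl, h1⟩, ⟨k, hk, rfl, h2⟩⟩
    exact hno (k : Int) hmem

-- ===== VERDICT (by name: the statement is the Claim_ definition above) =====
theorem exclude_rotatable_from_cycles_spec : Claim_equal_exclude_rotatable_from_cycles := by
  intro ts cycles _
  unfold Spec_exclude_rotatable_from_cycles exclude_rotatable_from_cycles exclude_rotatable_from_cycles_alt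
  rw [PySem.List.foldl_append_if_eq_filter]
  simp only [List.nil_append]
  exact List.filter_congr (fun t _ => found_eq_inter t.2.1 t.2.2.1 cycles)
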